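-- pv_equiv track=rewrite | github.com/korynewton/AdventofCode | 2019/4/puzzle.py | one_group_of_two
-- ===== SOURCE A (Python) =====
-- def one_group_of_two(num):
--     num = str(num)
--     start = end = 0
--
--     while end < len(num):
--         while end < len(num) and num[start] == num[end]:
--             end += 1
--         if end - start - 1 == 1:
--             return True
--         else:
--             start = end
--             end += 1
--     return False
-- ===== SOURCE B (Python) =====
-- def one_group_of_two(num):
--     s = str(num)
--     return any(
--         s[i] == s[i + 1]
--         and (i == 0 or s[i - 1] != s[i])
--         and (i + 2 == len(s) or s[i + 2] != s[i])
--         for i in range(len(s) - 1)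
--     )
-- ===== Notes on version B (the rewrite author's own statement) =====
-- stated objective: alternative
-- what changed: Replaces A's stateful two-pointer run scan (tracking run start/end and testing end-start-1==1) with a stateless per-index check: for every adjacent equal pair, test locally that the character before and after differ, so no run lengths or pointers are ever maintained.
import Mathlib
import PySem

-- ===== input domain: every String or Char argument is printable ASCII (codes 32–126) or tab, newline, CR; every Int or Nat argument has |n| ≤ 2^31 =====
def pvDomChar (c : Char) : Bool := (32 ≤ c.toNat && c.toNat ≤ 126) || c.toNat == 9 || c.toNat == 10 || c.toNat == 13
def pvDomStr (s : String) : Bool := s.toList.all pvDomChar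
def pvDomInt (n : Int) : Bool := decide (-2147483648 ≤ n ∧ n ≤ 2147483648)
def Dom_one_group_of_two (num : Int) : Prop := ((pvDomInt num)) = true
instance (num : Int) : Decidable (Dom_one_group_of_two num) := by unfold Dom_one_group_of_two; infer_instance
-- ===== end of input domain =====

-- B replaces A's stateful two-pointer run scan with a stateless per-index local-window check; objective: alternative.

-- ===== PORT A =====
-- inner while: `while end < len(num) and num[start] == num[end]: end += 1`
-- (indices only ever grow from 0 and accesses are guarded by `end < len`, so
-- Nat indices with `getD` are exact here)
def pvInnerA (s : List Char) (start e : Nat) : Nat :=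
  if _h : e < s.length ∧ (s.getD start ' ' == s.getD e ' ') = true then
    pvInnerA s start (e + 1)
  else e
termination_by s.length - e
decreasing_by omega

theorem pvInnerA_ge (s : List Char) (start e : Nat) : e ≤ pvInnerA s start e := by
  unfold pvInnerA
  split
  · exact le_trans (Nat.le_succ e) (pvInnerA_ge s start (e + 1))
  · exact le_refl e
termination_by s.length - e
decreasing_by rename_i h; omega

-- outer while: `while end < len(num): … if end - start - 1 == 1: return True else: start = end; end += 1`
def pvOuterA (s : List Char) (start e : Nat) : Bool :=
  if _h : e < s.length then
    let e' := pvInnerA s start e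
    if e' - start - 1 == 1 then true
    else pvOuterA s e' (e' + 1)
  else false
termination_by s.length - e
decreasing_by
  have := pvInnerA_ge s start e
  omega

def one_group_of_two (num : Int) : Bool :=
  pvOuterA (PySem.Int.toStr num).toList 0 0

-- ===== PORT B =====
-- any(s[i] == s[i+1] and (i == 0 or s[i-1] != s[i]) and (i+2 == len(s) or s[i+2] != s[i])
--     for i in range(len(s) - 1)); every access is guarded in range, so getD is exact
def pvAltAny (s : List Char) : Bool :=
  (List.range (s.length - 1)).any (fun i =>
    (s.getD i ' ' == s.getD (i + 1) ' ') &&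
    (decide (i = 0) || !(s.getD (i - 1) ' ' == s.getD i ' ')) &&
    (decide (i + 2 = s.length) || !(s.getD (i + 2) ' ' == s.getD i ' ')))

def one_group_of_two_alt (num : Int) : Bool :=
  pvAltAny (PySem.Int.toStr num).toList

-- ===== PRECONDITION & SPEC =====
def Spec_one_group_of_two (num : Int) (out : Bool) : Prop := out = one_group_of_two_alt num
instance (num : Int) (out : Bool) : Decidable (Spec_one_group_of_two num out) := by unfold Spec_one_group_of_two; infer_instance

-- ===== CLAIM (what is proved, stated in full; the proofs are below) =====
def Claim_equal_one_group_of_two : Prop := ∀ (num : Int), Dom_one_group_of_two num → Spec_one_group_of_two num (one_group_of_two num)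

-- ===== LEMMAS AND PROOFS =====

-- run lengths of the string (proof-only intermediate characterisation of A)
def pvRunLensAux (c : Char) (n : Nat) : List Char → List Nat
  | [] => [n]
  | d :: t => if d == c then pvRunLensAux c (n + 1) t else n :: pvRunLensAux d 1 t

def pvRunLens : List Char → List Nat
  | [] => []
  | c :: t => pvRunLensAux c 1 t

-- the inner loop advances `end` over the run of characters equal to num[start]
theorem pvInnerA_eq (s : List Char) (start e : Nat) :
    pvInnerA s start e = e + ((s.drop e).takeWhile (fun x => x == s.getD start ' ')).length := by
  rw [pvInnerA]
  split
  · rename_i h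
    obtain ⟨hl, hb⟩ := h
    have ih := pvInnerA_eq s start (e + 1)
    have hget : s.getD e ' ' = s[e] := List.getD_eq_getElem s ' ' hl
    have hdrop : s.drop e = s[e] :: s.drop (e + 1) := List.drop_eq_getElem_cons hl
    have hhead : (s[e] == s.getD start ' ') = true := by
      have : s.getD start ' ' = s.getD e ' ' := eq_of_beq hb
      rw [this, hget]
      exact beq_self_eq_true _
    rw [ih, hdrop, List.takeWhile_cons, hhead]
    simp
    omega
  · rename_i h
    by_cases hl : e < s.length
    · have hm : ¬ (s.getD start ' ' == s.getD e ' ') = true := fun hc => h ⟨hl, hc⟩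
      have hget : s.getD e ' ' = s[e] := List.getD_eq_getElem s ' ' hl
      have hhead : (s[e] == s.getD start ' ') = false := by
        rw [beq_eq_false_iff_ne]
        intro he
        exact hm (by rw [hget, he, beq_self_eq_true])
      rw [List.drop_eq_getElem_cons hl, List.takeWhile_cons, hhead]
      simp
    · rw [List.drop_eq_nil_of_le (le_of_not_gt hl)]
      simp
termination_by s.length - e
decreasing_by rename_i h; omega

theorem pvRunLensAux_eq (c : Char) (n : Nat) (t : List Char) :
    pvRunLensAux c n t
      = (n + (t.takeWhile (fun x => x == c)).length)
        :: pvRunLens (t.dropWhile (fun x => x == c)) := by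
  induction t generalizing c n with
  | nil => simp [pvRunLensAux, pvRunLens]
  | cons d t ih =>
    by_cases hd : (d == c) = true
    · rw [pvRunLensAux]
      simp only [hd, if_true, ih, List.takeWhile_cons, List.dropWhile_cons]
      simp
      omega
    · rw [pvRunLensAux]
      simp only [hd, List.takeWhile_cons, List.dropWhile_cons]
      simp [pvRunLens]

-- dropping the matched prefix is dropWhile
theorem pv_drop_takeWhile (p : Char → Bool) (t : List Char) :
    t.drop (t.takeWhile p).length = t.dropWhile p := by
  calc t.drop (t.takeWhile p).length
      = (t.takeWhile p ++ t.dropWhile p).drop (t.takeWhile p).length := by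
        rw [List.takeWhile_append_dropWhile]
    _ = t.dropWhile p := List.drop_left

-- main loop invariant for A: a "fresh" outer iteration at position start computes
-- "some run of the suffix has length exactly 2"
theorem pvOuterA_eq (s : List Char) (start : Nat) (h : start < s.length) :
    pvOuterA s start (start + 1) = (pvRunLens (s.drop start)).any (· == 2) := by
  have hc : s.getD start ' ' = s[start] := List.getD_eq_getElem s ' ' h
  have hdrop : s.drop start = s.getD start ' ' :: s.drop (start + 1) := by
    rw [List.drop_eq_getElem_cons h, hc]
  set c := s.getD start ' ' with hcdef
  set k := ((s.drop (start + 1)).takeWhile (fun x => x == c)).length with hk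
  have hinner : pvInnerA s start (start + 1) = start + 1 + k := pvInnerA_eq s start (start + 1)
  have hRHS : pvRunLens (s.drop start) = (1 + k) :: pvRunLens (s.drop (start + 1 + k)) := by
    rw [hdrop, pvRunLens, pvRunLensAux_eq, ← pv_drop_takeWhile, List.drop_drop, ← hk]
  rw [pvOuterA]
  by_cases h1 : start + 1 < s.length
  · rw [dif_pos h1]
    simp only [hinner]
    by_cases h2 : k = 1
    · have hct : (start + 1 + k - start - 1 == 1) = true := by
        have hh : start + 1 + k - start - 1 = k := by omega
        rw [hh, h2]
        rfl
      rw [hct, if_pos rfl, hRHS, h2]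
      simp
    · have hcf : (start + 1 + k - start - 1 == 1) = false := by
        have : start + 1 + k - start - 1 = k := by omega
        rw [this]
        simpa using h2
      have hhf : ((1 + k : Nat) == 2) = false := by
        simp
        omega
      rw [hcf, if_neg Bool.false_ne_true, hRHS, List.any_cons, hhf, Bool.false_or]
      by_cases h3 : start + 1 + k < s.length
      · exact pvOuterA_eq s (start + 1 + k) h3
      · have hnil : s.drop (start + 1 + k) = [] := List.drop_eq_nil_of_le (le_of_not_gt h3)
        rw [hnil, pvOuterA, dif_neg (by omega : ¬ start + 1 + k + 1 < s.length)]
        simp [pvRunLens]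
  · rw [dif_neg h1]
    have hnil : s.drop (start + 1) = [] := List.drop_eq_nil_of_le (le_of_not_gt h1)
    have hk0 : k = 0 := by rw [hk, hnil]; rfl
    rw [hRHS, hk0]
    have hnil2 : s.drop (start + 1 + 0) = [] := hnil
    rw [hnil2]
    simp [pvRunLens]
termination_by s.length - start
decreasing_by omega

theorem pvOuterA_zero (s : List Char) (h : 0 < s.length) :
    pvOuterA s 0 0 = pvOuterA s 0 1 := by
  have hi : pvInnerA s 0 0 = pvInnerA s 0 1 := by
    rw [pvInnerA, dif_pos ⟨h, beq_self_eq_true _⟩]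
  rw [pvOuterA, pvOuterA]
  by_cases h1 : 1 < s.length
  · rw [dif_pos h, dif_pos h1, hi]
  · have hl : s.length = 1 := by omega
    rw [dif_pos h, dif_neg h1]
    have he : pvInnerA s 0 0 = 1 := by
      rw [hi, pvInnerA, dif_neg (by simp [hl] : ¬ (1 < s.length ∧ (s.getD 0 ' ' == s.getD 1 ' ') = true))]
    simp only [he]
    rw [pvOuterA, dif_neg (by omega : ¬ 2 < s.length)]
    simp

-- ===== linking the run-length characterisation to B's local-window check =====

def pvGoodAt (s : List Char) (i : Nat) : Prop :=
  s.getD i ' ' = s.getD (i + 1) ' ' ∧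
  (i = 0 ∨ s.getD (i - 1) ' ' ≠ s.getD i ' ') ∧
  (i + 2 = s.length ∨ s.getD (i + 2) ' ' ≠ s.getD i ' ')

theorem pvAltAny_iff (s : List Char) :
    pvAltAny s = true ↔ ∃ i, i < s.length - 1 ∧ pvGoodAt s i := by
  simp [pvAltAny, pvGoodAt, List.any_eq_true, List.mem_range, and_assoc]

theorem pv_getD_repapp (m : Nat) (c : Char) (r : List Char) (i : Nat) :
    (List.replicate m c ++ r).getD i ' ' = if i < m then c else r.getD (i - m) ' ' := by
  by_cases h : i < m
  · rw [if_pos h, List.getD_append _ _ _ _ (by simpa using h)]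
    simp [List.getD_eq_getElem?_getD, h]
  · rw [if_neg h]
    simp only [List.getD_eq_getElem?_getD]
    rw [List.getElem?_append_right (by simpa using Nat.le_of_not_lt h)]
    simp

theorem pv_alt_repapp (m : Nat) (hm : 1 ≤ m) (c : Char) (r : List Char)
    (hr : ∀ d t', r = d :: t' → d ≠ c) :
    pvAltAny (List.replicate m c ++ r) = (decide (m = 2) || pvAltAny r) := by
  have hlen : (List.replicate m c ++ r).length = m + r.length := by simp
  have hget := pv_getD_repapp m c r
  rcases Bool.eq_false_or_eq_true (decide (m = 2) || pvAltAny r) with hb | hb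
  · -- RHS true:
    rw [hb]
    rw [Bool.or_eq_true] at hb
    rw [pvAltAny_iff]
    rcases hb with hb | hb
    · -- m = 2: i = 0 works
      have hm2 : m = 2 := by simpa using hb
      subst hm2
      refine ⟨0, by rw [hlen]; omega, ?_, Or.inl rfl, ?_⟩
      · rw [hget, hget, if_pos (by omega), if_pos (by omega)]
      · rcases hr' : r with _ | ⟨d, t'⟩
        · left; simp
        · right
          have hrw : (List.replicate 2 c ++ d :: t') = c :: c :: d :: t' := by
            simp [List.replicate_succ]
          rw [hrw]
          simpa using (hr d t' hr')
    · -- a witness j in r shifts to m + j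
      rw [pvAltAny_iff] at hb
      obtain ⟨j, hj, h1, h2, h3⟩ := hb
      refine ⟨m + j, by rw [hlen]; omega, ?_, ?_, ?_⟩
      · rw [hget, hget, if_neg (by omega), if_neg (by omega)]
        have e1 : m + j - m = j := by omega
        have e2 : m + j + 1 - m = j + 1 := by omega
        rwa [e1, e2]
      · right
        rcases Nat.eq_zero_or_pos j with hj0 | hjpos
        · subst hj0
          rw [hget, hget, if_pos (by omega), if_neg (by omega)]
          rcases hr' : r with _ | ⟨d, t'⟩
          · rw [hr'] at hj; simp at hj
          · have e1 : m + 0 - m = 0 := by omega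
            rw [e1]
            simpa using fun h => hr d t' hr' h.symm
        · rw [hget, hget, if_neg (by omega), if_neg (by omega)]
          have e1 : m + j - 1 - m = j - 1 := by omega
          have e2 : m + j - m = j := by omega
          rw [e1, e2]
          rcases h2 with h2 | h2
          · omega
          · exact h2
      · rcases h3 with h3 | h3
        · left; rw [hlen]; omega
        · right
          rw [hget, hget, if_neg (by omega), if_neg (by omega)]
          have e1 : m + j + 2 - m = j + 2 := by omega
          have e2 : m + j - m = j := by omega
          rw [e1, e2]
          exact h3

  · -- RHS false:
    rw [hb]
    rw [Bool.or_eq_false_iff] at hb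
    obtain ⟨hm2, hrF⟩ := hb
    have hm2' : m ≠ 2 := by simpa using hm2
    rw [← Bool.not_eq_true, pvAltAny_iff]
    rintro ⟨i, hi, h1, h2, h3⟩
    rw [hlen] at hi h3
    rw [hget, hget] at h1
    by_cases him : i < m
    · -- inside the replicate block
      rcases Nat.eq_zero_or_pos i with hi0 | hipos
      · subst hi0
        rw [if_pos him] at h1
        by_cases h1m : 1 < m
        · -- m ≥ 2, hence m ≥ 3: position 2 still c, contradicting h3
          have hm3 : 3 ≤ m := by omega
          rcases h3 with h3 | h3
          · omega
          · rw [hget, if_pos (by omega), hget, if_pos him] at h3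
            exact h3 rfl
        · -- m = 1: s[1] is r's head, which differs from c
          have hm1 : m = 1 := by omega
          rw [if_neg (by omega)] at h1
          rcases hr' : r with _ | ⟨d, t'⟩
          · rw [hr'] at hi; simp [hm1] at hi
          · have hd := hr d t' hr'
            rw [hr', hm1] at h1
            simp at h1
            exact hd h1.symm
      · -- 1 ≤ i < m: the previous character equals c too
        rcases h2 with h2 | h2
        · omega
        · rw [hget, if_pos (by omega), hget, if_pos him] at h2
          exact h2 rfl
    · -- inside r, at offset j = i - m: contradicts pvAltAny r = false
      have hj := Nat.le_of_not_lt him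
      set j := i - m with hjdef
      have hij : i = m + j := by omega
      rw [← Bool.not_eq_true, pvAltAny_iff] at hrF
      apply hrF
      refine ⟨j, by omega, ?_, ?_, ?_⟩
      · rw [if_neg him, if_neg (by omega)] at h1
        have : i + 1 - m = j + 1 := by omega
        rwa [this] at h1
      · rcases Nat.eq_zero_or_pos j with hj0 | hjpos
        · exact Or.inl hj0
        · right
          rcases h2 with h2 | h2
          · omega
          · rw [hget, if_neg (by omega), hget, if_neg him] at h2
            have e1 : i - 1 - m = j - 1 := by omega
            rwa [e1] at h2
      · rcases h3 with h3 | h3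
        · left; omega
        · right
          rw [hget, if_neg (by omega), hget, if_neg him] at h3
          have e1 : i + 2 - m = j + 2 := by omega
          rwa [e1] at h3
-- head of dropWhile fails the predicate
theorem pv_dropWhile_head (p : Char → Bool) (t : List Char) (d : Char) (t' : List Char)
    (h : t.dropWhile p = d :: t') : p d = false := by
  induction t with
  | nil => simp [List.dropWhile] at h
  | cons a t ih =>
    rw [List.dropWhile_cons] at h
    by_cases ha : p a = true
    · rw [if_pos ha] at h; exact ih h
    · rw [if_neg ha] at h
      cases h
      exact Bool.eq_false_iff.mpr ha

-- (pvRunLens l).any (·==2) coincides with the stateless local-window check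
theorem pvRunLens_eq_alt (l : List Char) :
    (pvRunLens l).any (· == 2) = pvAltAny l := by
  match l with
  | [] => rfl
  | c :: t =>
    set k := (t.takeWhile (fun x => x == c)).length with hk
    set rest := t.dropWhile (fun x => x == c) with hrest
    have htw : t.takeWhile (fun x => x == c) = List.replicate k c := by
      rw [List.eq_replicate_iff]
      refine ⟨rfl, fun x hx => ?_⟩
      have h' : (x == c) = true := List.mem_takeWhile_imp (p := fun x => x == c) hx
      exact eq_of_beq h'
    have hsplit : c :: t = List.replicate (k + 1) c ++ rest := by
      have : t = List.replicate k c ++ rest := by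
        rw [← htw, hrest, List.takeWhile_append_dropWhile]
      rw [this]
      simp [List.replicate_succ]
    have hhd : ∀ d t', rest = d :: t' → d ≠ c := by
      intro d t' hdt
      have := pv_dropWhile_head (fun x => x == c) t d t' (hrest ▸ hdt)
      simpa using this
    have hlt : rest.length < (c :: t).length := by
      have hle : rest.length ≤ t.length := by
        rw [hrest]; exact List.length_dropWhile_le _ _
      exact lt_of_le_of_lt hle (by simp)
    have hruns : pvRunLens (c :: t) = (1 + k) :: pvRunLens rest := by
      rw [pvRunLens, pvRunLensAux_eq]
    rw [hruns, List.any_cons, pvRunLens_eq_alt rest, hsplit,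
        pv_alt_repapp (k + 1) (by omega) c rest hhd, Nat.add_comm 1 k, beq_eq_decide]
termination_by l.length
decreasing_by exact hlt

-- ===== VERDICT (by name: the statement is the Claim_ definition above) =====
theorem one_group_of_two_spec : Claim_equal_one_group_of_two := by
  intro num _
  unfold Spec_one_group_of_two one_group_of_two one_group_of_two_alt
  set s := (PySem.Int.toStr num).toList with hs
  rw [← pvRunLens_eq_alt s]
  rcases Nat.eq_zero_or_pos s.length with h0 | h0
  · have : s = [] := List.eq_nil_of_length_eq_zero h0
    rw [this]
    rw [pvOuterA, pvRunLens]
    simp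
  · rw [pvOuterA_zero s h0, show (1 : Nat) = 0 + 1 from rfl, pvOuterA_eq s 0 h0]
    simp
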